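-- pv_equiv track=rewrite | github.com/ankurelexbit/predictorV2 | modeling_pipeline/pipeline_v4/scripts/extract_lineup_features.py | parse_formation
-- ===== SOURCE A (Python) =====
-- from typing import Dict, List, Optional, Tuple
--
-- def parse_formation(formation_str: str) -> Dict:
--     """Parse formation string like '4-3-3' into features"""
--     if not formation_str or not isinstance(formation_str, str):
--         return {'num_defenders': None, 'num_midfielders': None, 'num_forwards': None}
--
--     parts = formation_str.split('-')
--     try:
--         parts = [int(p) for p in parts]
--
--         # Standard interpretation: DEF-MID-FWD or DEF-MID1-MID2-FWD
--         if len(parts) == 3: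
--             return {
--                 'num_defenders': parts[0],
--                 'num_midfielders': parts[1],
--                 'num_forwards': parts[2]
--             }
--         elif len(parts) == 4:
--             return {
--                 'num_defenders': parts[0],
--                 'num_midfielders': parts[1] + parts[2],
--                 'num_forwards': parts[3]
--             }
--         elif len(parts) == 5:
--             return {
--                 'num_defenders': parts[0],
--                 'num_midfielders': parts[1] + parts[2] + parts[3],
--                 'num_forwards': parts[4]
--             }
--     except:
--         pass
--
--     return {'num_defenders': None, 'num_midfielders': None, 'num_forwards': None}
-- ===== SOURCE B (Python) =====
-- def parse_formation(formation_str: str):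
--     """Parse formation string like '4-3-3' via one role-assignment accumulation loop."""
--     none_result = {'num_defenders': None, 'num_midfielders': None, 'num_forwards': None}
--     if not formation_str or not isinstance(formation_str, str):
--         return none_result
--     parts = formation_str.split('-')
--     if not (3 <= len(parts) <= 5):
--         return none_result
--     roles = ['num_defenders'] + ['num_midfielders'] * (len(parts) - 2) + ['num_forwards']
--     acc = {'num_defenders': 0, 'num_midfielders': 0, 'num_forwards': 0}
--     try:
--         for role, p in zip(roles, parts):
--             acc[role] += int(p)
--     except ValueError:
--         return none_result
--     return acc
-- ===== Notes on version B (the rewrite author's own statement) =====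
-- stated objective: alternative
-- what changed: Replaces A's convert-then-branch-per-length structure (three explicit index-pattern returns) with a single accumulation pass: a positional role list is zipped with the parts and each int is added into a role->count dict, so no length-specific branch or first/middle/last indexing exists.
import Mathlib
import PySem

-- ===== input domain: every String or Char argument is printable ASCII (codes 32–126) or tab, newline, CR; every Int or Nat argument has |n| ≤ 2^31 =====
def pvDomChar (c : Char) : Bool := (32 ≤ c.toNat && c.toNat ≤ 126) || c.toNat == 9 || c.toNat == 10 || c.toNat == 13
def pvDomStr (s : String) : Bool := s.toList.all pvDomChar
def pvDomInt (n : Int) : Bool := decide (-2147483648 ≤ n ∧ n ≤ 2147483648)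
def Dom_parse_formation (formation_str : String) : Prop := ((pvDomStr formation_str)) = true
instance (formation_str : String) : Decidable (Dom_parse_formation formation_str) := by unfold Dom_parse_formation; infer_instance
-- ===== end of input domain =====

-- ===== PORT A =====
-- B replaces A's per-length branch returns with one role-assignment accumulation loop (alternative decomposition; same cost).

-- shared helper: the all-None result dict
def pvNoneDict : List (String × Option Int) :=
  [("num_defenders", none), ("num_midfielders", none), ("num_forwards", none)]

-- A's '[int(p) for p in parts]' inside the try (none = ValueError)
def pvInts? (parts : List (List Char)) : Option (List Int) :=
  parts.mapM PySem.Int.ofChars?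

def parse_formation (formation_str : String) : List (String × Option Int) :=
  if formation_str = "" then pvNoneDict
  else
    match pvInts? (PySem.Chars.splitOn formation_str.toList ['-']) with
    | none => pvNoneDict
    | some ps =>
      if ps.length = 3 then
        [("num_defenders", some (PySem.List.pyGetD ps 0 0)),
         ("num_midfielders", some (PySem.List.pyGetD ps 1 0)),
         ("num_forwards", some (PySem.List.pyGetD ps 2 0))]
      else if ps.length = 4 then
        [("num_defenders", some (PySem.List.pyGetD ps 0 0)),
         ("num_midfielders", some (PySem.List.pyGetD ps 1 0 + PySem.List.pyGetD ps 2 0)),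
         ("num_forwards", some (PySem.List.pyGetD ps 3 0))]
      else if ps.length = 5 then
        [("num_defenders", some (PySem.List.pyGetD ps 0 0)),
         ("num_midfielders", some (PySem.List.pyGetD ps 1 0 + PySem.List.pyGetD ps 2 0 + PySem.List.pyGetD ps 3 0)),
         ("num_forwards", some (PySem.List.pyGetD ps 4 0))]
      else pvNoneDict

-- ===== PORT B =====
-- B's 'try: for role, p in zip(roles, parts): acc[role] += int(p)' (none = ValueError escaping the loop)
def pvAccLoop : List (String × List Char) → PySem.Dict String Int → Option (PySem.Dict String Int)
  | [], acc => some acc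
  | (role, p) :: rest, acc =>
    match PySem.Int.ofChars? p with
    | none => none
    | some n => pvAccLoop rest (acc.modify role 0 (· + n))

def parse_formation_alt (formation_str : String) : List (String × Option Int) :=
  if formation_str = "" then pvNoneDict
  else
    let parts := PySem.Chars.splitOn formation_str.toList ['-']
    if 3 ≤ parts.length ∧ parts.length ≤ 5 then
      let roles := ["num_defenders"] ++ List.replicate (parts.length - 2) "num_midfielders" ++ ["num_forwards"]
      let acc0 : PySem.Dict String Int :=
        PySem.Dict.ofList [("num_defenders", 0), ("num_midfielders", 0), ("num_forwards", 0)]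
      match pvAccLoop (roles.zip parts) acc0 with
      | none => pvNoneDict
      | some acc => acc.items.map (fun kv => (kv.1, some kv.2))
    else pvNoneDict

-- ===== PRECONDITION & SPEC =====
def Spec_parse_formation (formation_str : String) (out : List (String × Option Int)) : Prop := out = parse_formation_alt formation_str
instance (formation_str : String) (out : List (String × Option Int)) : Decidable (Spec_parse_formation formation_str out) := by unfold Spec_parse_formation; infer_instance

-- ===== CLAIM (what is proved, stated in full; the proofs are below) =====
def Claim_equal_parse_formation : Prop := ∀ (formation_str : String), Dom_parse_formation formation_str → Spec_parse_formation formation_str (parse_formation formation_str)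

-- ===== LEMMAS AND PROOFS =====
lemma pvInts_length (parts : List (List Char)) (ns : List Int) (h : pvInts? parts = some ns) :
    ns.length = parts.length := by
  induction parts generalizing ns with
  | nil => simp [pvInts?] at h; simp [← h]
  | cons p rest ih =>
    simp only [pvInts?, List.mapM_cons] at h ih
    cases hp : PySem.Int.ofChars? p with
    | none => simp [hp] at h
    | some n =>
      simp only [hp, Option.bind_eq_bind, Option.pure_def, Option.bind_some] at h
      cases hr : rest.mapM PySem.Int.ofChars? with
      | none => simp [hr] at h
      | some ms =>
        rw [hr] at h
        obtain rfl : n :: ms = ns := by simpa using h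
        simp [ih ms hr]

lemma pvAccLoop_eq (parts : List (List Char)) (roles : List String)
    (acc : PySem.Dict String Int) (hlen : roles.length = parts.length) :
    pvAccLoop (roles.zip parts) acc
      = Option.map
          (fun ns => (roles.zip ns).foldl (fun d rn => d.modify rn.1 0 (· + rn.2)) acc)
          (pvInts? parts) := by
  induction parts generalizing roles acc with
  | nil =>
    cases roles with
    | nil => simp [pvAccLoop, pvInts?]
    | cons r rs => simp at hlen
  | cons p rest ih =>
    cases roles with
    | nil => simp at hlen
    | cons r rs =>
      simp only [List.length_cons, Nat.add_right_cancel_iff] at hlen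
      simp only [List.zip_cons_cons, pvAccLoop, pvInts?, List.mapM_cons]
      cases hp : PySem.Int.ofChars? p with
      | none => simp
      | some n =>
        simp only [Option.bind_eq_bind, Option.pure_def, Option.bind_some]
        rw [ih rs _ hlen]
        cases hr : pvInts? rest with
        | none => simp [pvInts?] at hr; simp [hr]
        | some ms =>
          simp only [pvInts?] at hr
          simp [hr]

set_option maxHeartbeats 2000000 in
lemma pv_body_eq (parts : List (List Char)) :
    (match pvInts? parts with
     | none => pvNoneDict
     | some ps =>
       if ps.length = 3 then
         [("num_defenders", some (PySem.List.pyGetD ps 0 0)),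
          ("num_midfielders", some (PySem.List.pyGetD ps 1 0)),
          ("num_forwards", some (PySem.List.pyGetD ps 2 0))]
       else if ps.length = 4 then
         [("num_defenders", some (PySem.List.pyGetD ps 0 0)),
          ("num_midfielders", some (PySem.List.pyGetD ps 1 0 + PySem.List.pyGetD ps 2 0)),
          ("num_forwards", some (PySem.List.pyGetD ps 3 0))]
       else if ps.length = 5 then
         [("num_defenders", some (PySem.List.pyGetD ps 0 0)),
          ("num_midfielders", some (PySem.List.pyGetD ps 1 0 + PySem.List.pyGetD ps 2 0 + PySem.List.pyGetD ps 3 0)),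
          ("num_forwards", some (PySem.List.pyGetD ps 4 0))]
       else pvNoneDict)
    =
    (if 3 ≤ parts.length ∧ parts.length ≤ 5 then
       match pvAccLoop ((["num_defenders"] ++ List.replicate (parts.length - 2) "num_midfielders" ++ ["num_forwards"]).zip parts)
               (PySem.Dict.ofList [("num_defenders", 0), ("num_midfielders", 0), ("num_forwards", 0)]) with
       | none => pvNoneDict
       | some acc => acc.items.map (fun kv => (kv.1, some kv.2))
     else pvNoneDict) := by
  by_cases hlen : 3 ≤ parts.length ∧ parts.length ≤ 5
  · rw [if_pos hlen,
      pvAccLoop_eq parts _ _ (by simp [List.length_replicate]; omega)]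
    cases h : pvInts? parts with
    | none => rfl
    | some ns =>
      have hns := pvInts_length parts ns h
      have h3 : ns.length = 3 ∨ ns.length = 4 ∨ ns.length = 5 := by omega
      rcases ns with _ | ⟨n0, _ | ⟨n1, _ | ⟨n2, _ | ⟨n3, _ | ⟨n4, _ | ⟨n5, t⟩⟩⟩⟩⟩⟩ <;>
        simp only [List.length_nil, List.length_cons] at h3 <;> try omega
      all_goals (
        rw [← hns]
        norm_num [List.replicate_succ, List.replicate_zero]
        simp [List.foldl,
          PySem.List.pyGetD, PySem.List.pyGet?, PySem.List.pyIdx?,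
          PySem.Dict.modify, PySem.Dict.ofList, PySem.Dict.update,
          PySem.Dict.insert, PySem.Dict.getD, PySem.Dict.get?, PySem.Dict.empty,
          PySem.Dict.contains]
        try ring_nf)
  · rw [if_neg hlen]
    cases h : pvInts? parts with
    | none => rfl
    | some ns =>
      have hns := pvInts_length parts ns h
      have : ¬ (ns.length = 3) ∧ ¬ (ns.length = 4) ∧ ¬ (ns.length = 5) := by omega
      simp [this.1, this.2.1, this.2.2]

-- ===== VERDICT (by name: the statement is the Claim_ definition above) =====
theorem parse_formation_spec : Claim_equal_parse_formation := by
  intro s _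
  unfold Spec_parse_formation parse_formation parse_formation_alt
  split_ifs with h
  · rfl
  · exact pv_body_eq (PySem.Chars.splitOn s.toList ['-'])
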